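-- pv_equiv track=rewrite | github.com/manugrandio/artists-api | utils/passphrase.py | count_valid_basic_passphrases
-- ===== SOURCE A (Python) =====
-- def basic_passphrase_is_valid(passphrase):
--     words = passphrase.split()
--     return len(words) == len(set(words))
--
-- def count_valid_basic_passphrases(passphrases):
--     passphrases_list = passphrases.split("\n")
--     return len(
--         [
--             passphrase
--             for passphrase in passphrases_list
--             if basic_passphrase_is_valid(passphrase)
--         ]
--     )
-- ===== SOURCE B (Python) =====
-- def _has_adjacent_duplicate(words):
--     for prev, cur in zip(words, words[1:]):
--         if prev == cur:
--             return True
--     return False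
--
--
-- def count_valid_basic_passphrases(passphrases):
--     count = 0
--     for line in passphrases.split("\n"):
--         if not _has_adjacent_duplicate(sorted(line.split())):
--             count += 1
--     return count
-- ===== Notes on version B (the rewrite author's own statement) =====
-- stated objective: alternative
-- what changed: Duplicate words in a line are detected by sorting the words and scanning once for equal adjacent neighbours (with an accumulator loop over lines), instead of comparing the word-list length to the size of a hash set inside a list comprehension.
import Mathlib
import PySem

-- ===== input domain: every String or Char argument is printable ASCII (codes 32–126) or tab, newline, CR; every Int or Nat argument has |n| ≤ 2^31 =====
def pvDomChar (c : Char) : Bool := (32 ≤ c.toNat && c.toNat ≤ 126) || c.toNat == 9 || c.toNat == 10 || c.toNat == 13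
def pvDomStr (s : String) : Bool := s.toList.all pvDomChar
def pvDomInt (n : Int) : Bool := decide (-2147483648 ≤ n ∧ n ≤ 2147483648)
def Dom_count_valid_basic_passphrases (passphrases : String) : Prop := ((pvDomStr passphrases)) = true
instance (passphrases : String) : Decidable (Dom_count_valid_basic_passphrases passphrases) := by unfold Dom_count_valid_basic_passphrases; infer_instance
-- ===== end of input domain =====

-- B detects duplicate words per line by sorting the words and scanning adjacent pairs,
-- instead of A's length-vs-set-size comparison inside a comprehension (objective: alternative).


-- ===== PORT A =====
def basic_passphrase_is_valid (passphrase : String) : Bool :=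
  let words := PySem.Str.split₀ passphrase
  decide (words.length = (PySem.Set.ofList words).length)

def count_valid_basic_passphrases (passphrases : String) : Int :=
  let passphrases_list := (PySem.Str.split? passphrases "\n").getD []
  ((passphrases_list.filter (fun passphrase => basic_passphrase_is_valid passphrase)).length : Int)

-- ===== PORT B =====
-- B's helper: scan the (sorted) word list once, comparing each element with its successor
def has_adjacent_duplicate : List String → Bool
  | prev :: cur :: rest => prev == cur || has_adjacent_duplicate (cur :: rest)
  | _ => false

def count_valid_basic_passphrases_alt (passphrases : String) : Int :=
  ((PySem.Str.split? passphrases "\n").getD []).foldl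
    (fun count line =>
      if !has_adjacent_duplicate (PySem.List.sorted (PySem.Str.split₀ line) (fun x => x)) then
        count + 1
      else count)
    0

-- ===== PRECONDITION & SPEC =====
def Spec_count_valid_basic_passphrases (passphrases : String) (out : Int) : Prop := out = count_valid_basic_passphrases_alt passphrases
instance (passphrases : String) (out : Int) : Decidable (Spec_count_valid_basic_passphrases passphrases out) := by unfold Spec_count_valid_basic_passphrases; infer_instance

-- ===== CLAIM (what is proved, stated in full; the proofs are below) =====
def Claim_equal_count_valid_basic_passphrases : Prop := ∀ (passphrases : String), Dom_count_valid_basic_passphrases passphrases → Spec_count_valid_basic_passphrases passphrases (count_valid_basic_passphrases passphrases)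

-- ===== LEMMAS AND PROOFS =====

-- |set(ws)| = |ws| exactly when ws has no duplicates
theorem len_ofList_eq_iff (xs : List String) :
    (PySem.Set.ofList xs).length = xs.length ↔ xs.Nodup := by
  induction xs with
  | nil => simp [PySem.Set.ofList]
  | cons x xs ih =>
    rw [PySem.Set.ofList_cons]
    have hle : (PySem.Set.discard (PySem.Set.ofList xs) x).length ≤ (PySem.Set.ofList xs).length :=
      List.length_filter_le _ _
    have hle2 : (PySem.Set.ofList xs).length ≤ xs.length := PySem.Set.length_ofList_le xs
    have hfilt : (PySem.Set.discard (PySem.Set.ofList xs) x).length = (PySem.Set.ofList xs).length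
        ↔ ∀ a ∈ PySem.Set.ofList xs, (!a == x) = true := by
      simp [PySem.Set.discard,
        List.length_filter_eq_length_iff (p := fun y => !y == x) (l := PySem.Set.ofList xs)]
    constructor
    · intro h
      simp only [List.length_cons] at h
      have h1 : (PySem.Set.discard (PySem.Set.ofList xs) x).length = (PySem.Set.ofList xs).length := by omega
      have h2 : (PySem.Set.ofList xs).length = xs.length := by omega
      have hx : x ∉ xs := by
        intro hx
        have := hfilt.mp h1 x ((PySem.Set.mem_ofList _ _).mpr hx)
        simp at this
      exact List.nodup_cons.mpr ⟨hx, ih.mp h2⟩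
    · intro h
      rcases List.nodup_cons.mp h with ⟨hx, hnd⟩
      have h1 : (PySem.Set.discard (PySem.Set.ofList xs) x).length = (PySem.Set.ofList xs).length := by
        apply hfilt.mpr
        intro a ha
        have : a ∈ xs := (PySem.Set.mem_ofList _ _).mp ha
        simp only [Bool.not_eq_eq_eq_not, Bool.not_true, beq_eq_false_iff_ne, ne_eq]
        intro h'; exact hx (h' ▸ this)
      have h2 := ih.mpr hnd
      simp only [List.length_cons]; omega

-- on a ≤-sorted list, no adjacent equal pair means no duplicates at all
theorem adjDup_false_iff_nodup (l : List String)
    (hp : l.Pairwise (fun a b => a ≤ b)) :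
    has_adjacent_duplicate l = false ↔ l.Nodup := by
  induction l with
  | nil => simp [has_adjacent_duplicate]
  | cons a t ih =>
    cases t with
    | nil => simp [has_adjacent_duplicate]
    | cons b t' =>
      rcases List.pairwise_cons.mp hp with ⟨hab, hp'⟩
      rcases List.pairwise_cons.mp hp' with ⟨hbt, _⟩
      have hab' : a ≤ b := hab b (by simp)
      simp only [has_adjacent_duplicate, Bool.or_eq_false_iff, beq_eq_false_iff_ne, ne_eq]
      rw [ih hp']
      constructor
      · rintro ⟨hne, hnd⟩
        refine List.nodup_cons.mpr ⟨?_, hnd⟩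
        intro hmem
        rcases List.mem_cons.mp hmem with h | h
        · exact hne h
        · exact hne (le_antisymm hab' (hbt a h))
      · intro h
        rcases List.nodup_cons.mp h with ⟨hmem, hnd⟩
        exact ⟨fun h' => hmem (h' ▸ List.mem_cons_self), hnd⟩

-- the per-line tests of A and B agree
theorem valid_eq (line : String) :
    (!has_adjacent_duplicate (PySem.List.sorted (PySem.Str.split₀ line) (fun x => x)))
      = basic_passphrase_is_valid line := by
  unfold basic_passphrase_is_valid
  set ws := PySem.Str.split₀ line with hws
  have hperm := PySem.List.sorted_perm ws (fun x => x) false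
  have hp := PySem.List.sorted_pairwise ws (fun x => x)
  have h1 := adjDup_false_iff_nodup _ hp
  have h2 : (PySem.List.sorted ws (fun x => x)).Nodup ↔ ws.Nodup := hperm.nodup_iff
  have h3 := len_ofList_eq_iff ws
  by_cases hnd : ws.Nodup
  · simp [h1.mpr (h2.mpr hnd), (h3.mpr hnd).symm]
  · have : has_adjacent_duplicate (PySem.List.sorted ws (fun x => x)) = true := by
      by_contra h
      exact hnd (h2.mp (h1.mp (by simpa using h)))
    have hlen : ¬ ws.length = (PySem.Set.ofList ws).length := fun h => hnd (h3.mp h.symm)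
    simp [this, hlen]

-- counting loop = length of filter
theorem foldl_count_eq (l : List String) (n : Int) :
    l.foldl (fun count line =>
        if !has_adjacent_duplicate (PySem.List.sorted (PySem.Str.split₀ line) (fun x => x)) then
          count + 1
        else count) n
      = n + ((l.filter (fun p => basic_passphrase_is_valid p)).length : Int) := by
  induction l generalizing n with
  | nil => simp
  | cons x xs ih =>
    simp only [List.foldl_cons, List.filter_cons, ih]
    rw [← valid_eq x]
    by_cases h : (!has_adjacent_duplicate (PySem.List.sorted (PySem.Str.split₀ x) (fun y => y))) = true
    · simp [h]; ring
    · simp at h; simp [h]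

-- ===== VERDICT (by name: the statement is the Claim_ definition above) =====
theorem count_valid_basic_passphrases_spec : Claim_equal_count_valid_basic_passphrases := by
  intro passphrases _
  unfold Spec_count_valid_basic_passphrases count_valid_basic_passphrases count_valid_basic_passphrases_alt
  rw [foldl_count_eq]
  simp
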